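-- pv_equiv track=rewrite | github.com/inaciovasquez2020/chronos-urf-rr | scripts/generate_heawood_lifts.py | base_projection_ball
-- ===== SOURCE A (Python) =====
-- from collections import deque
--
-- def base_projection_ball(base_adj, root_u, radius):
--     dist = {root_u: 0}
--     q = deque([root_u])
--     while q:
--         u = q.popleft()
--         if dist[u] == radius:
--             continue
--         for w in base_adj[u]:
--             if w not in dist:
--                 dist[w] = dist[u] + 1
--                 q.append(w)
--     return dist
-- ===== SOURCE B (Python) =====
-- def base_projection_ball(base_adj, root_u, radius):
--     # Level-synchronous BFS: expand whole frontiers, tracking the current depth.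
--     dist = {root_u: 0}
--     frontier = [root_u]
--     depth = 0
--     while frontier:
--         if depth == radius:
--             break
--         nxt = []
--         for u in frontier:
--             for w in base_adj[u]:
--                 if w not in dist:
--                     dist[w] = depth + 1
--                     nxt.append(w)
--         frontier = nxt
--         depth += 1
--     return dist
-- ===== Notes on version B (the rewrite author's own statement) =====
-- stated objective: alternative
-- what changed: Replaces the single FIFO queue with a per-node radius check by a level-synchronous BFS that expands one whole frontier per iteration and keeps an explicit depth counter.
import Mathlib
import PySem

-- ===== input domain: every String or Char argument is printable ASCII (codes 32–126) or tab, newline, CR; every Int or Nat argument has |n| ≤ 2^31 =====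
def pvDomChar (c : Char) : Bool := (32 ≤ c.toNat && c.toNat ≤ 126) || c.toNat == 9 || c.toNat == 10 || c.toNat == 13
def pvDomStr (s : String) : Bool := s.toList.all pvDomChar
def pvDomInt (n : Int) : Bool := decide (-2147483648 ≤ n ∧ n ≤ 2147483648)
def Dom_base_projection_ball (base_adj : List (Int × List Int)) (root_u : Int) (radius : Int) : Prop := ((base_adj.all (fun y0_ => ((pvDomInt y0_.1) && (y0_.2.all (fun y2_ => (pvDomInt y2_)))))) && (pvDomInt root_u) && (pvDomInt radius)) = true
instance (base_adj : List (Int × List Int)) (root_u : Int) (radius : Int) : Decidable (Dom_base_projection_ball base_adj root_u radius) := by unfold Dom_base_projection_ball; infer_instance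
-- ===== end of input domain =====

-- B is a level-synchronous BFS (whole-frontier expansion with a depth counter) instead of
-- A's single FIFO queue with a per-node radius check; equal return value on Pre_.

-- ===== PORT A =====
-- shared helper: base_adj[u] as a Python dict lookup (first match); on a missing key the
-- Python raises KeyError — those inputs are excluded by Pre_, the [] default is never used there
def adjGet (base_adj : List (Int × List Int)) (u : Int) : List Int :=
  ((PySem.Dict.mk base_adj).get? u).getD []

-- termination measure helper (proof device only, not part of either algorithm):
-- number of neighbour values not yet bound in dist
def pvMissing (base_adj : List (Int × List Int)) (dist : PySem.Dict Int Int) : Nat :=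
  (((base_adj.flatMap Prod.snd).dedup).filter (fun w => !(dist.contains w))).length

theorem pvMissing_insert (base_adj : List (Int × List Int)) (dist : PySem.Dict Int Int)
    (w v : Int) (hw : w ∈ (base_adj.flatMap Prod.snd).dedup) (hfresh : dist.contains w = false) :
    pvMissing base_adj (dist.insert w v) + 1 = pvMissing base_adj dist := by
  unfold pvMissing
  have hnd : ((base_adj.flatMap Prod.snd).dedup).Nodup := List.nodup_dedup _
  revert hw hnd
  induction (base_adj.flatMap Prod.snd).dedup with
  | nil => intro hw; cases hw
  | cons x l ih =>
    intro hw hnd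
    rcases List.nodup_cons.1 hnd with ⟨hx, hl⟩
    by_cases hxw : x = w
    · subst hxw
      have h1 : (dist.insert x v).contains x = true := PySem.Dict.contains_insert_self _ _ _
      have h2 : ∀ y ∈ l, (!(dist.insert x v).contains y) = (!dist.contains y) := by
        intro y hy
        have hyx : (y == x) = false := beq_eq_false_iff_ne.mpr (fun h => hx (h ▸ hy))
        rw [PySem.Dict.contains_insert]
        simp [hyx]
      simp only [List.filter_cons, h1, hfresh, Bool.not_true, Bool.not_false,
        Bool.false_eq_true, if_false, if_true, List.length_cons]
      rw [List.filter_congr h2]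
    · have hw' : w ∈ l := by
        rcases List.mem_cons.1 hw with h | h
        · exact absurd h.symm hxw
        · exact h
      have hc : (dist.insert w v).contains x = dist.contains x := by
        have hx2 : (x == w) = false := beq_eq_false_iff_ne.mpr hxw
        rw [PySem.Dict.contains_insert]; simp [hx2]
      simp only [List.filter_cons, hc]
      by_cases hcx : dist.contains x = true
      · simp only [hcx, Bool.not_true, Bool.false_eq_true, if_false]
        exact ih hw' hl
      · simp only [eq_false_of_ne_true hcx, Bool.not_false, if_true, List.length_cons]
        have := ih hw' hl
        omega

theorem adjGet_mem_flatMap (base_adj : List (Int × List Int)) (u w : Int)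
    (hw : w ∈ adjGet base_adj u) : w ∈ base_adj.flatMap Prod.snd := by
  unfold adjGet at hw
  induction base_adj with
  | nil => simp [PySem.Dict.get?] at hw
  | cons p rest ih =>
    rw [PySem.Dict.get?_mk_cons] at hw
    by_cases h : p.1 == u
    · simp only [h, if_true] at hw
      exact List.mem_flatMap.2 ⟨p, List.mem_cons_self .., hw⟩
    · simp only [h] at hw
      exact List.mem_flatMap.2 (by
        rcases List.mem_flatMap.1 (ih hw) with ⟨q, hq, hwq⟩
        exact ⟨q, List.mem_cons_of_mem _ hq, hwq⟩)

-- inner loop of A: 'for w in base_adj[u]: if w not in dist: dist[w]=dist[u]+1; q.append(w)'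
-- (du = dist[u], unchanged during the loop since u is already a key of dist)
def pvStepA (du : Int) (dist : PySem.Dict Int Int) (q : List Int) :
    List Int → PySem.Dict Int Int × List Int
  | [] => (dist, q)
  | w :: ws =>
    if dist.contains w then pvStepA du dist q ws
    else pvStepA du (dist.insert w (du + 1)) (q ++ [w]) ws

theorem pvStepA_measure (base_adj : List (Int × List Int)) (du : Int) :
    ∀ (ws : List Int) (dist : PySem.Dict Int Int) (q : List Int),
    (∀ w ∈ ws, w ∈ (base_adj.flatMap Prod.snd).dedup) →
    (pvStepA du dist q ws).2.length + pvMissing base_adj (pvStepA du dist q ws).1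
      = q.length + pvMissing base_adj dist := by
  intro ws
  induction ws with
  | nil => intro dist q _; simp [pvStepA]
  | cons w ws ih =>
    intro dist q hsub
    by_cases hc : dist.contains w
    · simp only [pvStepA, hc, if_true]  -- contains: skip
      exact ih dist q (fun x hx => hsub x (List.mem_cons_of_mem _ hx))
    · simp only [pvStepA, hc, Bool.false_eq_true, if_false]
      rw [ih _ _ (fun x hx => hsub x (List.mem_cons_of_mem _ hx))]
      have := pvMissing_insert base_adj dist w (du + 1)
        (hsub w (List.mem_cons_self ..)) (eq_false_of_ne_true hc)
      simp only [List.length_append, List.length_cons, List.length_nil]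
      omega

-- main loop of A: FIFO queue BFS with 'if dist[u] == radius: continue'
def pvRunA (base_adj : List (Int × List Int)) (radius : Int)
    (dist : PySem.Dict Int Int) (q : List Int) : PySem.Dict Int Int :=
  match q with
  | [] => dist
  | u :: q' =>
    let du := dist.getD u 0   -- dist[u]; u is always a key of dist here
    if du = radius then pvRunA base_adj radius dist q'
    else
      let p := pvStepA du dist q' (adjGet base_adj u)
      pvRunA base_adj radius p.1 p.2
termination_by q.length + pvMissing base_adj dist
decreasing_by
  · simp only [List.length_cons]; omega
  · have h := pvStepA_measure base_adj (dist.getD u 0) (adjGet base_adj u) dist q'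
      (fun w hw => List.mem_dedup.2 (adjGet_mem_flatMap base_adj u w hw))
    simp only [List.length_cons]
    omega

def base_projection_ball (base_adj : List (Int × List Int)) (root_u : Int) (radius : Int) : List (Int × Int) :=
  (pvRunA base_adj radius (PySem.Dict.empty.insert root_u 0) [root_u]).items

-- ===== PORT B =====
-- inner loop of B: 'for w in base_adj[u]: if w not in dist: dist[w] = depth + 1; nxt.append(w)'
def pvExpandInner (depth : Int) (dist : PySem.Dict Int Int) (nxt : List Int) :
    List Int → PySem.Dict Int Int × List Int
  | [] => (dist, nxt)
  | w :: ws =>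
    if dist.contains w then pvExpandInner depth dist nxt ws
    else pvExpandInner depth (dist.insert w (depth + 1)) (nxt ++ [w]) ws

theorem pvExpandInner_measure (base_adj : List (Int × List Int)) (depth : Int) :
    ∀ (ws : List Int) (dist : PySem.Dict Int Int) (nxt : List Int),
    (∀ w ∈ ws, w ∈ (base_adj.flatMap Prod.snd).dedup) →
    (pvExpandInner depth dist nxt ws).2.length + pvMissing base_adj (pvExpandInner depth dist nxt ws).1
      = nxt.length + pvMissing base_adj dist := by
  intro ws
  induction ws with
  | nil => intro dist nxt _; simp [pvExpandInner]
  | cons w ws ih =>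
    intro dist nxt hsub
    by_cases hc : dist.contains w
    · simp only [pvExpandInner, hc, if_true]
      exact ih dist nxt (fun x hx => hsub x (List.mem_cons_of_mem _ hx))
    · simp only [pvExpandInner, hc, Bool.false_eq_true, if_false]
      rw [ih _ _ (fun x hx => hsub x (List.mem_cons_of_mem _ hx))]
      have := pvMissing_insert base_adj dist w (depth + 1)
        (hsub w (List.mem_cons_self ..)) (eq_false_of_ne_true hc)
      simp only [List.length_append, List.length_cons, List.length_nil]
      omega

-- outer 'for u in frontier' of one level
def pvExpand (base_adj : List (Int × List Int)) (depth : Int) :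
    List Int → PySem.Dict Int Int → List Int → PySem.Dict Int Int × List Int
  | [], dist, nxt => (dist, nxt)
  | u :: us, dist, nxt =>
    let p := pvExpandInner depth dist nxt (adjGet base_adj u)
    pvExpand base_adj depth us p.1 p.2

theorem pvExpand_measure (base_adj : List (Int × List Int)) (depth : Int) :
    ∀ (us : List Int) (dist : PySem.Dict Int Int) (nxt : List Int),
    (pvExpand base_adj depth us dist nxt).2.length + pvMissing base_adj (pvExpand base_adj depth us dist nxt).1
      = nxt.length + pvMissing base_adj dist := by
  intro us
  induction us with
  | nil => intro dist nxt; simp [pvExpand]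
  | cons u us ih =>
    intro dist nxt
    simp only [pvExpand]
    rw [ih]
    exact pvExpandInner_measure base_adj depth (adjGet base_adj u) dist nxt
      (fun w hw => List.mem_dedup.2 (adjGet_mem_flatMap base_adj u w hw))

-- main loop of B: 'while frontier: if depth == radius: break; …; depth += 1'
def pvRunB (base_adj : List (Int × List Int)) (radius : Int)
    (dist : PySem.Dict Int Int) (frontier : List Int) (depth : Int) : PySem.Dict Int Int :=
  match frontier with
  | [] => dist
  | u :: us =>
    if depth = radius then dist
    else
      let p := pvExpand base_adj depth (u :: us) dist []
      pvRunB base_adj radius p.1 p.2 (depth + 1)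
termination_by frontier.length + pvMissing base_adj dist
decreasing_by
  have h := pvExpand_measure base_adj depth (u :: us) dist []
  simp only [List.length_cons, List.length_nil] at h ⊢
  omega

def base_projection_ball_alt (base_adj : List (Int × List Int)) (root_u : Int) (radius : Int) : List (Int × Int) :=
  (pvRunB base_adj radius (PySem.Dict.empty.insert root_u 0) [root_u] 0).items

-- ===== PRECONDITION & SPEC =====
-- closed-form helpers for Pre_: the ball of nodes reachable from the root along dict keys
def pvKeys (base_adj : List (Int × List Int)) : List Int := base_adj.map Prod.fst

-- one expansion of the reachable set: add the neighbours of its key members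
def pvStepSet (base_adj : List (Int × List Int)) (S : List Int) : List Int :=
  (S ++ (S.filter (fun u => decide (u ∈ pvKeys base_adj))).flatMap (adjGet base_adj)).dedup

def pvBallSet (base_adj : List (Int × List Int)) : Nat → List Int → List Int
  | 0, S => S
  | n + 1, S => pvBallSet base_adj n (pvStepSet base_adj S)

-- depth bound for the ball: radius - 1 levels, capped at the (stabilising) universe size;
-- a negative radius never stops the traversal, so it takes the full closure
def pvFuel (base_adj : List (Int × List Int)) (radius : Int) : Nat :=
  let bound := base_adj.length + (base_adj.flatMap Prod.snd).length + 1
  if radius < 0 then bound else min (radius - 1).toNat bound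

-- Pre_ excludes exactly the inputs on which the Python raises KeyError: some node reachable
-- from the root through dict keys at depth < radius (any depth if radius < 0) is not a key
-- of base_adj; with radius == 0 no adjacency is ever read, so nothing is required.
def Pre_base_projection_ball (base_adj : List (Int × List Int)) (root_u : Int) (radius : Int) : Prop :=
  radius = 0 ∨
    (pvBallSet base_adj (pvFuel base_adj radius) [root_u]).all
      (fun x => decide (x ∈ pvKeys base_adj)) = true
instance (base_adj : List (Int × List Int)) (root_u : Int) (radius : Int) : Decidable (Pre_base_projection_ball base_adj root_u radius) := by unfold Pre_base_projection_ball; infer_instance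
def pvWitness_base_projection_ball : (List (Int × List Int)) × Int × Int := ([(0, [1]), (1, [0, 2]), (2, [])], 0, 2)

def Spec_base_projection_ball (base_adj : List (Int × List Int)) (root_u : Int) (radius : Int) (out : List (Int × Int)) : Prop := out = base_projection_ball_alt base_adj root_u radius
instance (base_adj : List (Int × List Int)) (root_u : Int) (radius : Int) (out : List (Int × Int)) : Decidable (Spec_base_projection_ball base_adj root_u radius out) := by unfold Spec_base_projection_ball; infer_instance

-- ===== CLAIM (what is proved, stated in full; the proofs are below) =====
def Claim_equal_base_projection_ball : Prop := ∀ (base_adj : List (Int × List Int)) (root_u : Int) (radius : Int), Dom_base_projection_ball base_adj root_u radius → Pre_base_projection_ball base_adj root_u radius → Spec_base_projection_ball base_adj root_u radius (base_projection_ball base_adj root_u radius)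

-- ===== LEMMAS AND PROOFS =====

-- A's inner neighbour loop and B's are the same state transformer (A reads dist[u] per
-- iteration, but dist[u] is constant there; B uses the equal depth counter)
theorem stepA_eq_expandInner (d : Int) :
    ∀ (ws : List Int) (dist : PySem.Dict Int Int) (q : List Int),
    pvStepA d dist q ws = pvExpandInner d dist q ws := by
  intro ws
  induction ws with
  | nil => intro dist q; rfl
  | cons w ws ih =>
    intro dist q
    by_cases hc : dist.contains w
    · simp only [pvStepA, pvExpandInner, hc, if_true, ih]
    · simp only [pvStepA, pvExpandInner, hc, Bool.false_eq_true, if_false, ih]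

-- the inner loop only appends to its accumulator
theorem expandInner_append (d : Int) :
    ∀ (ws : List Int) (dist : PySem.Dict Int Int) (a b : List Int),
    pvExpandInner d dist (a ++ b) ws
      = ((pvExpandInner d dist b ws).1, a ++ (pvExpandInner d dist b ws).2) := by
  intro ws
  induction ws with
  | nil => intro dist a b; rfl
  | cons w ws ih =>
    intro dist a b
    by_cases hc : dist.contains w
    · simp only [pvExpandInner, hc, if_true, ih]
    · simp only [pvExpandInner, hc, Bool.false_eq_true, if_false, List.append_assoc, ih]

-- existing bindings survive the inner loop (it inserts only fresh keys)
theorem expandInner_preserve (d : Int) :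
    ∀ (ws : List Int) (dist : PySem.Dict Int Int) (nxt : List Int) (x v : Int),
    dist.get? x = some v → (pvExpandInner d dist nxt ws).1.get? x = some v := by
  intro ws
  induction ws with
  | nil => intro dist nxt x v h; exact h
  | cons w ws ih =>
    intro dist nxt x v h
    by_cases hc : dist.contains w
    · simp only [pvExpandInner, hc, if_true]; exact ih dist nxt x v h
    · simp only [pvExpandInner, hc, Bool.false_eq_true, if_false]
      have hxw : x ≠ w := by
        intro he; subst he
        rw [PySem.Dict.contains_eq_isSome_get?, h] at hc
        exact hc rfl
      exact ih _ _ x v (by rw [PySem.Dict.get?_insert_of_ne _ _ hxw]; exact h)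

-- every node the inner loop appends ends up bound to depth d+1
theorem expandInner_newdepth (d : Int) :
    ∀ (ws : List Int) (dist : PySem.Dict Int Int) (nxt : List Int) (x : Int),
    x ∈ (pvExpandInner d dist nxt ws).2 →
    x ∈ nxt ∨ (pvExpandInner d dist nxt ws).1.get? x = some (d + 1) := by
  intro ws
  induction ws with
  | nil => intro dist nxt x h; exact Or.inl h
  | cons w ws ih =>
    intro dist nxt x hx
    by_cases hc : dist.contains w
    · simp only [pvExpandInner, hc, if_true] at hx ⊢
      exact ih dist nxt x hx
    · simp only [pvExpandInner, hc, Bool.false_eq_true, if_false] at hx ⊢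
      rcases ih _ _ x hx with h | h
      · rcases List.mem_append.1 h with h' | h'
        · exact Or.inl h'
        · have hxw : x = w := by simpa using h'
          subst hxw
          exact Or.inr (expandInner_preserve d ws _ _ x (d + 1)
            (PySem.Dict.get?_insert_self _ _ _))
      · exact Or.inr h

-- the same two facts for a whole level
theorem expand_preserve (base_adj : List (Int × List Int)) (d : Int) :
    ∀ (us : List Int) (dist : PySem.Dict Int Int) (nxt : List Int) (x v : Int),
    dist.get? x = some v → (pvExpand base_adj d us dist nxt).1.get? x = some v := by
  intro us
  induction us with
  | nil => intro dist nxt x v h; exact h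
  | cons u us ih =>
    intro dist nxt x v h
    simp only [pvExpand]
    exact ih _ _ x v (expandInner_preserve d (adjGet base_adj u) dist nxt x v h)

theorem expand_newdepth (base_adj : List (Int × List Int)) (d : Int) :
    ∀ (us : List Int) (dist : PySem.Dict Int Int) (nxt : List Int) (x : Int),
    x ∈ (pvExpand base_adj d us dist nxt).2 →
    x ∈ nxt ∨ (pvExpand base_adj d us dist nxt).1.get? x = some (d + 1) := by
  intro us
  induction us with
  | nil => intro dist nxt x h; exact Or.inl h
  | cons u us ih =>
    intro dist nxt x hx
    simp only [pvExpand] at hx ⊢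
    rcases ih _ _ x hx with h | h
    · rcases expandInner_newdepth d (adjGet base_adj u) dist nxt x h with h' | h'
      · exact Or.inl h'
      · exact Or.inr (expand_preserve base_adj d us _ _ x (d + 1) h')
    · exact Or.inr h

-- A skips a whole queue of nodes already at the radius
theorem runA_skip (base_adj : List (Int × List Int)) (radius : Int) :
    ∀ (F : List Int) (dist : PySem.Dict Int Int),
    (∀ u ∈ F, dist.get? u = some radius) →
    pvRunA base_adj radius dist F = dist := by
  intro F
  induction F with
  | nil => intro dist _; rw [pvRunA]
  | cons u F ih =>
    intro dist hF
    have hdu : dist.getD u 0 = radius := by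
      rw [PySem.Dict.getD_eq_get?_getD, hF u (List.mem_cons_self ..)]; rfl
    rw [pvRunA, hdu, if_pos rfl]
    exact ih dist (fun x hx => hF x (List.mem_cons_of_mem _ hx))

-- one level of A's queue processing IS B's whole-frontier expansion
theorem runA_level (base_adj : List (Int × List Int)) (radius d : Int) (hd : d ≠ radius) :
    ∀ (F : List Int) (dist : PySem.Dict Int Int) (G : List Int),
    (∀ u ∈ F, dist.get? u = some d) →
    pvRunA base_adj radius dist (F ++ G)
      = pvRunA base_adj radius (pvExpand base_adj d F dist G).1 (pvExpand base_adj d F dist G).2 := by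
  intro F
  induction F with
  | nil => intro dist G _; rfl
  | cons u F ih =>
    intro dist G hF
    have hdu : dist.getD u 0 = d := by
      rw [PySem.Dict.getD_eq_get?_getD, hF u (List.mem_cons_self ..)]; rfl
    rw [List.cons_append, pvRunA, hdu, if_neg hd]
    rw [stepA_eq_expandInner, expandInner_append]
    have hF' : ∀ x ∈ F, (pvExpandInner d dist G (adjGet base_adj u)).1.get? x = some d :=
      fun x hx => expandInner_preserve d _ dist G x d (hF x (List.mem_cons_of_mem _ hx))
    rw [ih _ _ hF']
    rfl

-- the main simulation, by strong induction on the termination measure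
theorem runA_eq_runB (base_adj : List (Int × List Int)) (radius : Int) :
    ∀ (n : Nat) (dist : PySem.Dict Int Int) (F : List Int) (d : Int),
    F.length + pvMissing base_adj dist ≤ n →
    (∀ u ∈ F, dist.get? u = some d) →
    pvRunA base_adj radius dist F = pvRunB base_adj radius dist F d := by
  intro n
  induction n with
  | zero =>
    intro dist F d hn _
    have : F = [] := List.length_eq_zero_iff.1 (by omega)
    subst this
    rw [pvRunA, pvRunB]
  | succ n ih =>
    intro dist F d hn hF
    match F with
    | [] => rw [pvRunA, pvRunB]
    | u :: us =>
      by_cases hd : d = radius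
      · rw [pvRunB, if_pos hd]
        exact runA_skip base_adj radius (u :: us) dist (fun x hx => hd ▸ hF x hx)
      · rw [pvRunB, if_neg hd]
        have hstep := runA_level base_adj radius d hd (u :: us) dist [] hF
        rw [List.append_nil] at hstep
        rw [hstep]
        have hm := pvExpand_measure base_adj d (u :: us) dist []
        apply ih
        · simp only [List.length_nil, List.length_cons] at hm hn
          omega
        · intro x hx
          rcases expand_newdepth base_adj d (u :: us) dist [] x hx with h | h
          · cases h
          · exact h

-- ===== VERDICT (by name: the statement is the Claim_ definition above) =====
theorem base_projection_ball_spec : Claim_equal_base_projection_ball := by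
  intro base_adj root_u radius _ _
  unfold Spec_base_projection_ball base_projection_ball base_projection_ball_alt
  rw [runA_eq_runB base_adj radius
      (1 + pvMissing base_adj (PySem.Dict.empty.insert root_u 0)) _ _ 0
      (by simp)
      (fun x hx => by
        have : x = root_u := by simpa using hx
        subst this
        exact PySem.Dict.get?_insert_self _ _ _)]
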